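-- pv_equiv track=rewrite | github.com/tangoat2019/EPI_Python | Interview Prep/Microsoft/min_move.py | min_move
-- ===== SOURCE A (Python) =====
-- def min_move(s: str)-> int:
-- 	r_count, ans = 0, 0
-- 	if len(s) == 0: return 0
-- 	r_char = s[0]
-- 	for i,c in enumerate(s):
-- 		if c == r_char:
-- 			r_count += 1
-- 			if r_count == 3:
-- 				r_char = 'a' if c == 'b' else 'b'
-- 				r_count = 1
-- 				ans += 1
-- 		else:
-- 			r_char = c
-- 			r_count = 1
-- 	return ans
-- ===== SOURCE B (Python) =====
-- def min_move(s: str) -> int: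
--     total = 0
--     i, n = 0, len(s)
--     while i < n:
--         j = i
--         while j < n and s[j] == s[i]:
--             j += 1
--         total += (j - i) // 3
--         i = j
--     return total
-- ===== Notes on version B (the rewrite author's own statement) =====
-- stated objective: simpler
-- what changed: Replaced A's per-character counter/flip state machine by a scan over maximal equal-character runs that simply adds (run length)//3 per run.
-- intended difference: When a run whose length is divisible by 3 is immediately followed by a run of A's flip character ('a' after a run of 'b', else 'b') whose length is 2 mod 3 (possibly through a chain of such runs), A's leftover flipped tracking character bleeds a phantom count into the next run and A overcounts (e.g. 'aaabb' -> 2), while B returns the intended minimal number of changes, one per full triple in each run ('aaabb' -> 1). — e.g. on min_move("aaabb"): A returns 2, B returns 1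
import Mathlib
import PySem

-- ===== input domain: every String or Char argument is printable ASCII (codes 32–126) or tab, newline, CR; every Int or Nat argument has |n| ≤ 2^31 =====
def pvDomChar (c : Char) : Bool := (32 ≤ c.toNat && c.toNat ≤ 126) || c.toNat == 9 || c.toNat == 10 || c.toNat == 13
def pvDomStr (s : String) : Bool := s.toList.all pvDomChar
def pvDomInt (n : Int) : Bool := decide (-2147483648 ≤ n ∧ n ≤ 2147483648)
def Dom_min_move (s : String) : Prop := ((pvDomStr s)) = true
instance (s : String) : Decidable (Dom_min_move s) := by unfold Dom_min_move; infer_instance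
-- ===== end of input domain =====

-- B replaces A's per-character counter/flip state machine by a scan over maximal
-- equal-character runs adding (run length)//3 per run; A = B except on the stated
-- D_ inputs, where A's leftover flipped tracking character makes it overcount and
-- B returns the intended value.


-- ===== PORT A =====
-- one step of A's for-loop over the characters (the enumerate index is unused)
def pvStepA (st : Char × Int × Int) (c : Char) : Char × Int × Int :=
  let rc := st.1
  let cnt := st.2.1
  let ans := st.2.2
  if c == rc then
    let cnt := cnt + 1
    if cnt == 3 then ((if c == 'b' then 'a' else 'b'), 1, ans + 1)
    else (rc, cnt, ans)
  else (c, 1, ans)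

def min_move (s : String) : Int :=
  match s.toList with
  | [] => 0                                   -- if len(s) == 0: return 0
  | c0 :: _ =>                                -- r_char = s[0]
      (s.toList.foldl pvStepA (c0, 0, 0)).2.2

-- ===== PORT B =====
-- Source B's outer while: at position i the inner while advances j over the chars equal
-- to s[i]; here the run head is c and k counts the remaining equal chars, so the run
-- length j - i is k + 1.  The Nat fuel (initialised to the length, a bound on the
-- number of outer iterations) only makes the recursion structural.
def pvRunSum : Nat → List Char → Int
  | _, [] => 0
  | 0, _ :: _ => 0
  | fuel + 1, c :: rest =>
      let k := (rest.takeWhile (fun x => x == c)).length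
      (((k + 1) / 3 : Nat) : Int) + pvRunSum fuel (rest.drop k)

def min_move_alt (s : String) : Int := pvRunSum s.toList.length s.toList

-- ===== PRECONDITION & SPEC =====
-- D_: run decomposition of s contains (after a possible chain) a run of length ≡ 0 mod 3
-- whose following run starts with A's flip character and has length ≡ 2 mod 3; there A's
-- leftover flipped tracking character adds a phantom count and A overcounts (e.g. "aaabb"
-- -> 2) while B returns the intended one-change-per-triple value ("aaabb" -> 1).
def pvOver : Nat → Bool → List Char → Bool
  | _, _, [] => false
  | 0, _, _ :: _ => false
  | fuel + 1, carry, c :: rest =>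
      let k := (rest.takeWhile (fun x => x == c)).length
      let t := rest.drop k
      (carry && (k + 1) % 3 == 2) ||
        pvOver fuel
          ((k + 1 + (if carry then 1 else 0)) % 3 == 0 && (match t with
            | [] => false
            | d :: _ => d == (if c == 'b' then 'a' else 'b')))
          t

def D_min_move (s : String) : Prop := pvOver s.toList.length false s.toList = true
instance (s : String) : Decidable (D_min_move s) := by unfold D_min_move; infer_instance

def Spec_min_move (s : String) (out : Int) : Prop := ¬ D_min_move s → out = min_move_alt s
instance (s : String) (out : Int) : Decidable (Spec_min_move s out) := by
  unfold Spec_min_move; infer_instance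

def pvDiffWitness_min_move : String := "aaabb"
def pvDiffWitnessOut_min_move : Int × Int := (2, 1)

-- ===== CLAIM (what is proved, stated in full; the proofs are below) =====
def Claim_unchanged_min_move : Prop := ∀ (s : String), Dom_min_move s → Spec_min_move s (min_move s)
def Claim_changed_min_move : Prop := Dom_min_move (pvDiffWitness_min_move) ∧ D_min_move (pvDiffWitness_min_move) ∧ min_move (pvDiffWitness_min_move) = pvDiffWitnessOut_min_move.1 ∧ min_move_alt (pvDiffWitness_min_move) = pvDiffWitnessOut_min_move.2 ∧ pvDiffWitnessOut_min_move.1 ≠ pvDiffWitnessOut_min_move.2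
def Claim_exact_min_move : Prop := ∀ (s : String), Dom_min_move s → D_min_move s → min_move s ≠ min_move_alt s

-- ===== LEMMAS AND PROOFS =====

-- proof-side intermediate form of A: a run-at-a-time machine with a one-bit carry
-- encoding A's cross-run tracked-character state; A is proved equal to it, and it
-- is split into pvRunSum + overcount below.
def minMoveCarry : Nat → Bool → List Char → Int
  | _, _, [] => 0
  | 0, _, _ :: _ => 0
  | fuel + 1, carry, c :: rest =>
      let k := (rest.takeWhile (fun x => x == c)).length
      let e := k + 1 + (if carry then 1 else 0)
      let t := rest.drop k
      ((e / 3 : Nat) : Int) +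
        minMoveCarry fuel
          (e % 3 == 0 && (match t with
            | [] => false
            | d :: _ => d == (if c == 'b' then 'a' else 'b')))
          t

-- the flip character A tracks after completing a triple of c
def pvFlip (c : Char) : Char := if c == 'b' then 'a' else 'b'

-- A's answer characterised at run boundaries: ansC fuel k c l is the answer contributed
-- from machine state (c, k, ·) with remaining input l, for k = 1 or k = 2 (phantom count).
def ansC : Nat → Nat → Char → List Char → Int
  | 0, _, _, _ => 0
  | fuel + 1, k, c, l =>
      let m := (l.takeWhile (fun x => x == c)).length
      (((m + k) / 3 : Nat) : Int) +
        match l.dropWhile (fun x => x == c) with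
        | [] => 0
        | d :: t' => if (m + k) % 3 = 0 ∧ d = pvFlip c then ansC fuel 2 d t' else ansC fuel 1 d t'

theorem pvFlip_ne (c : Char) : pvFlip c ≠ c := by
  unfold pvFlip
  by_cases h : c = 'b'
  · subst h; decide
  · simp only [h, beq_iff_eq]
    exact fun e => h e.symm

theorem takeWhile_eq_replicate (l : List Char) (c : Char) :
    l.takeWhile (fun x => x == c) = List.replicate (l.takeWhile (fun x => x == c)).length c := by
  rw [List.eq_replicate_iff]
  refine ⟨rfl, fun b hb => ?_⟩
  have := List.mem_takeWhile_imp hb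
  simpa using this

theorem dropWhile_head_ne (l t' : List Char) (c d : Char)
    (h : l.dropWhile (fun x => x == c) = d :: t') : d ≠ c := by
  have := List.head?_dropWhile_not (p := fun x => x == c) (l := l)
  rw [h] at this
  simpa using this

theorem drop_len_takeWhile (l : List Char) (c : Char) :
    l.drop ((l.takeWhile (fun x => x == c)).length) = l.dropWhile (fun x => x == c) := by
  conv_lhs => rw [← List.takeWhile_append_dropWhile (p := fun x => x == c) (l := l)]
  rw [List.drop_append_of_le_length (by simp)]
  simp

theorem dropWhile_cons_length (l t' : List Char) (c d : Char)
    (h : l.dropWhile (fun x => x == c) = d :: t') : t'.length < l.length := by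
  have h1 := List.length_dropWhile_le (l := l) (p := fun x => x == c)
  rw [h] at h1
  simp only [List.length_cons] at h1
  omega

theorem ansC_congr : ∀ f g (k : Nat) (c : Char) (l : List Char),
    l.length < f → l.length < g → ansC f k c l = ansC g k c l := by
  intro f
  induction f with
  | zero => intro g k c l hf; omega
  | succ f ih =>
      intro g k c l hf hg
      match g, hg with
      | g + 1, hg =>
        rw [ansC, ansC]
        cases hdw : l.dropWhile (fun x => x == c) with
        | nil => simp
        | cons d t' =>
            have hlt := dropWhile_cons_length l t' c d hdw
            by_cases hc : ((l.takeWhile (fun x => x == c)).length + k) % 3 = 0 ∧ d = pvFlip c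
            · simp only [if_pos hc, ih g 2 d t' (by omega) (by omega)]
            · simp only [if_neg hc, ih g 1 d t' (by omega) (by omega)]

-- processing a block of copies of c from state (c, k, ·)
theorem foldl_replicate (m k : Nat) (c : Char) (a : Int) (hk : k = 1 ∨ k = 2) :
    List.foldl pvStepA (c, (k : Int), a) (List.replicate m c) =
      if (m + k) % 3 = 0 then (pvFlip c, 1, a + (((m + k) / 3 : Nat) : Int))
      else (c, (((m + k) % 3 : Nat) : Int), a + (((m + k) / 3 : Nat) : Int)) := by
  induction m with
  | zero =>
      rw [if_neg (by omega)]
      have h3 : (0 + k) % 3 = k := by omega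
      have h4 : (0 + k) / 3 = 0 := by omega
      rw [h3, h4]
      simp
  | succ m ih =>
      rw [List.replicate_succ', List.foldl_append, ih, List.foldl_cons, List.foldl_nil]
      have h3 : (m + k) % 3 = 0 ∨ (m + k) % 3 = 1 ∨ (m + k) % 3 = 2 := by omega
      rcases h3 with h3 | h3 | h3
      · rw [if_pos h3, if_neg (by omega)]
        have hne : (c == pvFlip c) = false := by
          simp only [beq_eq_false_iff_ne, ne_eq]
          exact fun e => pvFlip_ne c e.symm
        simp only [pvStepA, hne]
        have h5 : (m + 1 + k) % 3 = 1 := by omega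
        have h6 : (m + 1 + k) / 3 = (m + k) / 3 := by omega
        rw [h5, h6]
        simp
      · rw [if_neg (by omega), if_neg (by omega)]
        simp only [pvStepA, beq_self_eq_true, if_true, h3]
        have h5 : (m + 1 + k) % 3 = 2 := by omega
        have h6 : (m + 1 + k) / 3 = (m + k) / 3 := by omega
        rw [h5, h6]
        norm_num
      · rw [if_neg (by omega), if_pos (by omega)]
        simp only [pvStepA, beq_self_eq_true, if_true, h3]
        have h5 : (m + 1 + k) / 3 = (m + k) / 3 + 1 := by omega
        rw [h5]
        norm_num [pvFlip]
        ring

theorem machine_main :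
    ∀ n (l : List Char), l.length ≤ n → ∀ (k : Nat) (c : Char) (a : Int), (k = 1 ∨ k = 2) →
      (List.foldl pvStepA (c, (k : Int), a) l).2.2 = a + ansC (l.length + 1) k c l := by
  intro n
  induction n with
  | zero =>
      intro l hl k c a hk
      have : l = [] := by cases l <;> simp_all
      subst this
      rw [ansC]
      rcases hk with hk | hk <;> subst hk <;> simp [List.foldl_nil]
  | succ n ih =>
      intro l hl k c a hk
      have hsplit := List.takeWhile_append_dropWhile (p := fun x => x == c) (l := l)
      set m := (l.takeWhile (fun x => x == c)).length with hm
      have hrep := takeWhile_eq_replicate l c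
      cases hdw : l.dropWhile (fun x => x == c) with
      | nil =>
          have hleq : l = List.replicate m c := by
            rw [← hsplit, hdw, hrep, List.append_nil]
          rw [hleq, foldl_replicate m k c a hk, ansC]
          simp only [List.takeWhile_replicate, List.dropWhile_replicate]
          by_cases h0 : (m + k) % 3 = 0
          · rw [if_pos h0]; simp
          · rw [if_neg h0]; simp
      | cons d t' =>
          have hd_ne : d ≠ c := dropWhile_head_ne l t' c d hdw
          have hlt : t'.length < l.length := dropWhile_cons_length l t' c d hdw
          have hlen : l.length = m + 1 + t'.length := by
            conv_lhs => rw [← hsplit, hdw]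
            simp [← hm]
            omega
          have hleq : l = List.replicate m c ++ (d :: t') := by
            rw [← hsplit, hdw, hrep]
          conv_lhs => rw [hleq]
          rw [List.foldl_append, foldl_replicate m k c a hk, List.foldl_cons]
          rw [show ansC (l.length + 1) k c l =
            (((m + k) / 3 : Nat) : Int) +
              (if (m + k) % 3 = 0 ∧ d = pvFlip c then ansC l.length 2 d t'
               else ansC l.length 1 d t') from by rw [ansC, ← hm, hdw]]
          by_cases h0 : (m + k) % 3 = 0
          · rw [if_pos h0]
            by_cases hdf : d = pvFlip c
            · rw [if_pos ⟨h0, hdf⟩]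
              have hstep : pvStepA (pvFlip c, 1, a + (((m + k) / 3 : Nat) : Int)) d
                  = (d, 2, a + (((m + k) / 3 : Nat) : Int)) := by
                simp [pvStepA, hdf]
              rw [hstep]
              have ih2 := ih t' (by omega) 2 d (a + (((m + k) / 3 : Nat) : Int)) (Or.inr rfl)
              simp only [Nat.cast_ofNat] at ih2
              rw [ih2, ansC_congr (t'.length + 1) l.length 2 d t' (by omega) (by omega)]
              ring
            · rw [if_neg (by tauto)]
              have hstep : pvStepA (pvFlip c, 1, a + (((m + k) / 3 : Nat) : Int)) d
                  = (d, 1, a + (((m + k) / 3 : Nat) : Int)) := by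
                have : (d == pvFlip c) = false := by simp [hdf]
                simp [pvStepA, this]
              rw [hstep]
              have ih1 := ih t' (by omega) 1 d (a + (((m + k) / 3 : Nat) : Int)) (Or.inl rfl)
              simp only [Nat.cast_one] at ih1
              rw [ih1, ansC_congr (t'.length + 1) l.length 1 d t' (by omega) (by omega)]
              ring
          · rw [if_neg h0, if_neg (by tauto)]
            have hstep : pvStepA (c, (((m + k) % 3 : Nat) : Int), a + (((m + k) / 3 : Nat) : Int)) d
                = (d, 1, a + (((m + k) / 3 : Nat) : Int)) := by
              have : (d == c) = false := by simp [hd_ne]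
              simp [pvStepA, this]
            rw [hstep]
            have ih1 := ih t' (by omega) 1 d (a + (((m + k) / 3 : Nat) : Int)) (Or.inl rfl)
            simp only [Nat.cast_one] at ih1
            rw [ih1, ansC_congr (t'.length + 1) l.length 1 d t' (by omega) (by omega)]
            ring

theorem minMoveCarry_congr : ∀ f g (b : Bool) (l : List Char),
    l.length ≤ f → l.length ≤ g → minMoveCarry f b l = minMoveCarry g b l := by
  intro f
  induction f with
  | zero =>
      intro g b l hf _
      have : l = [] := by cases l <;> simp_all
      subst this; cases g <;> rfl
  | succ f ih =>
      intro g b l hf hg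
      cases l with
      | nil => cases g <;> rfl
      | cons c rest =>
          match g, hg with
          | g + 1, hg =>
            simp only [minMoveCarry]
            have h1 : (rest.drop ((rest.takeWhile (fun x => x == c)).length)).length ≤ rest.length := by
              simp [List.length_drop]
            simp only [List.length_cons] at hf hg
            rw [ih g _ _ (by omega) (by omega)]

theorem carry_main :
    ∀ n (l : List Char), l.length ≤ n → ∀ (b : Bool) (c : Char),
      ansC (l.length + 1) (cond b 2 1) c l = minMoveCarry (l.length + 1) b (c :: l) := by
  intro n
  induction n with
  | zero =>
      intro l hl b c
      have : l = [] := by cases l <;> simp_all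
      subst this
      cases b <;> simp [ansC, minMoveCarry]
  | succ n ih =>
      intro l hl b c
      set m := (l.takeWhile (fun x => x == c)).length with hm
      have hke : m + cond b 2 1 = m + 1 + (if b then 1 else 0) := by cases b <;> simp
      have hrhs : minMoveCarry (l.length + 1) b (c :: l) =
          (((m + 1 + (if b then 1 else 0)) / 3 : Nat) : Int) +
            minMoveCarry l.length
              ((m + 1 + (if b then 1 else 0)) % 3 == 0 &&
                (match l.dropWhile (fun x => x == c) with
                  | [] => false
                  | d :: _ => d == (if c == 'b' then 'a' else 'b')))
              (l.dropWhile (fun x => x == c)) := by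
        simp only [minMoveCarry, ← hm]
        rw [hm, drop_len_takeWhile]
      cases hdw : l.dropWhile (fun x => x == c) with
      | nil =>
          rw [hrhs, hdw]
          rw [show ansC (l.length + 1) (cond b 2 1) c l =
              (((m + cond b 2 1) / 3 : Nat) : Int) + 0 from by rw [ansC, ← hm, hdw]]
          rw [hke]
          cases l.length <;> simp [minMoveCarry]
      | cons d t' =>
          have hlt : t'.length < l.length := dropWhile_cons_length l t' c d hdw
          rw [hrhs, hdw]
          rw [show ansC (l.length + 1) (cond b 2 1) c l =
            (((m + cond b 2 1) / 3 : Nat) : Int) +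
              (if (m + cond b 2 1) % 3 = 0 ∧ d = pvFlip c then ansC l.length 2 d t'
               else ansC l.length 1 d t') from by rw [ansC, ← hm, hdw]]
          rw [hke]
          congr 1
          set e := m + 1 + (if b then 1 else 0) with he
          set b' : Bool := (e % 3 == 0 && (d == (if c == 'b' then 'a' else 'b'))) with hb'
          have hcond : ((e % 3 = 0 ∧ d = pvFlip c) ↔ b' = true) := by
            rw [hb']
            simp [pvFlip]
          have hrec := ih t' (by omega) b' d
          by_cases hc : e % 3 = 0 ∧ d = pvFlip c
          · have hb1 : b' = true := hcond.mp hc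
            rw [if_pos hc,
              ansC_congr l.length (t'.length + 1) 2 d t' (by omega) (by omega)]
            rw [hb1] at hrec
            simp only [cond_true] at hrec
            rw [hrec, hb1]
            exact minMoveCarry_congr (t'.length + 1) l.length true (d :: t')
              (by simp) (by simp; omega)
          · have hb0 : b' = false := by
              cases hb : b'
              · rfl
              · exact absurd (hcond.mpr hb) hc
            rw [if_neg hc,
              ansC_congr l.length (t'.length + 1) 1 d t' (by omega) (by omega)]
            rw [hb0] at hrec
            simp only [cond_false] at hrec
            rw [hrec, hb0]
            exact minMoveCarry_congr (t'.length + 1) l.length false (d :: t')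
              (by simp) (by simp; omega)

-- A equals the run-at-a-time carry machine (with fuel = length)
theorem A_eq_carry (s : String) :
    min_move s = minMoveCarry s.toList.length false s.toList := by
  cases hl : s.toList with
  | nil => simp [min_move, hl, minMoveCarry]
  | cons c0 rest =>
      have hA : min_move s = (List.foldl pvStepA (c0, (0 : Int), 0) (c0 :: rest)).2.2 := by
        unfold min_move
        rw [hl]
      have hstep : pvStepA (c0, (0 : Int), 0) c0 = (c0, 1, 0) := by
        simp [pvStepA]
      have hmach := machine_main rest.length rest (le_refl _) 1 c0 0 (Or.inl rfl)
      simp only [Nat.cast_one] at hmach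
      have hcarry := carry_main rest.length rest (le_refl _) false c0
      simp only [cond_false] at hcarry
      rw [hA, List.foldl_cons, hstep, hmach, hcarry]
      simp only [hl, List.length_cons, zero_add]

-- the next-run carry bit of the machine (proof-side abbreviation)
def pvNext (carry : Bool) (c : Char) (rest : List Char) : Bool :=
  ((rest.takeWhile (fun x => x == c)).length + 1 + (if carry then 1 else 0)) % 3 == 0 &&
    (match rest.drop (rest.takeWhile (fun x => x == c)).length with
      | [] => false
      | d :: _ => d == (if c == 'b' then 'a' else 'b'))

theorem mm_unfold (f : Nat) (b : Bool) (c : Char) (rest : List Char) :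
    minMoveCarry (f + 1) b (c :: rest) =
      ((((rest.takeWhile (fun x => x == c)).length + 1 + (if b then 1 else 0)) / 3 : Nat) : Int) +
        minMoveCarry f (pvNext b c rest)
          (rest.drop (rest.takeWhile (fun x => x == c)).length) := rfl

theorem ov_unfold (f : Nat) (b : Bool) (c : Char) (rest : List Char) :
    pvOver (f + 1) b (c :: rest) =
      ((b && ((rest.takeWhile (fun x => x == c)).length + 1) % 3 == 2) ||
        pvOver f (pvNext b c rest)
          (rest.drop (rest.takeWhile (fun x => x == c)).length)) := rfl

theorem rs_unfold (f : Nat) (c : Char) (rest : List Char) :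
    pvRunSum (f + 1) (c :: rest) =
      ((((rest.takeWhile (fun x => x == c)).length + 1) / 3 : Nat) : Int) +
        pvRunSum f (rest.drop (rest.takeWhile (fun x => x == c)).length) := rfl

-- the carry machine splits: it is pvRunSum plus a nonnegative overcount,
-- zero exactly when pvOver is false and positive exactly when pvOver is true
theorem carry_split : ∀ f (b : Bool) (l : List Char),
    (pvRunSum f l ≤ minMoveCarry f b l) ∧
    (pvOver f b l = false → minMoveCarry f b l = pvRunSum f l) ∧
    (pvOver f b l = true → pvRunSum f l < minMoveCarry f b l) := by
  intro f
  induction f with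
  | zero =>
      intro b l
      cases l <;> simp [pvRunSum, minMoveCarry, pvOver]
  | succ f ih =>
      intro b l
      cases l with
      | nil => simp [pvRunSum, minMoveCarry, pvOver]
      | cons c rest =>
          rw [mm_unfold, ov_unfold, rs_unfold]
          obtain ⟨hle, hz, hp⟩ :=
            ih (pvNext b c rest) (rest.drop (rest.takeWhile (fun x => x == c)).length)
          set k := (rest.takeWhile (fun x => x == c)).length with hk
          set t := rest.drop k with ht
          set M := minMoveCarry f (pvNext b c rest) t with hM
          set R := pvRunSum f t with hR
          cases b with
          | false =>
              simp only [Bool.false_and, Bool.false_or, Bool.false_eq_true,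
                ↓reduceIte, Nat.add_zero]
              exact ⟨by omega, fun h => by rw [hz h], fun h => by have := hp h; omega⟩
          | true =>
              simp only [Bool.true_and, ↓reduceIte]
              have hcast1 : ((((k + 1) / 3 : Nat)) : Int) ≤ (((k + 1 + 1) / 3 : Nat) : Int) := by
                exact_mod_cast (by omega : ((k + 1) / 3 : Nat) ≤ ((k + 1 + 1) / 3 : Nat))
              refine ⟨by omega, ?_, ?_⟩
              · intro h
                rcases Bool.or_eq_false_iff.mp h with ⟨h1, h2⟩
                have hm2 : ¬ ((k + 1) % 3 = 2) := by simpa using h1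
                have hdeq : ((k + 1 + 1) / 3 : Nat) = ((k + 1) / 3 : Nat) := by omega
                rw [hz h2, hdeq]
              · intro h
                rcases Bool.or_eq_true_iff.mp h with h1 | h1
                · have hm2 : (k + 1) % 3 = 2 := by simpa using h1
                  have hdeq : ((k + 1 + 1) / 3 : Nat) = ((k + 1) / 3 : Nat) + 1 := by omega
                  have : ((((k + 1) / 3 : Nat)) : Int) + 1 = (((k + 1 + 1) / 3 : Nat) : Int) := by
                    rw [hdeq]; push_cast; ring
                  omega
                · have := hp h1
                  omega

-- ===== VERDICT (by name: the statements are the Claim_ definitions above) =====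
theorem min_move_spec : Claim_unchanged_min_move := by
  intro s _
  unfold Spec_min_move
  intro hnd
  have h0 : pvOver s.toList.length false s.toList = false := by
    cases hx : pvOver s.toList.length false s.toList
    · rfl
    · exact absurd hx hnd
  rw [A_eq_carry, (carry_split s.toList.length false s.toList).2.1 h0]
  rfl

theorem min_move_changed : Claim_changed_min_move := by
  unfold Claim_changed_min_move; decide

theorem min_move_tight : Claim_exact_min_move := by
  intro s _ hd
  have := (carry_split s.toList.length false s.toList).2.2 hd
  rw [A_eq_carry]
  unfold min_move_alt
  omega
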